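-- pv_equiv track=rewrite | github.com/pypi-data/pypi-mirror-68 | packages/Phosphorpy/Phosphorpy-0.7.5-py3-none-any.whl/Phosphorpy/data/sub/magnitudes.py | get_survey_cols
-- ===== SOURCE A (Python) =====
-- def get_survey_cols(cols, s_cols, prefix):
--     """
--     Returns the names of the magnitudes in a specific survey
--
--     :param cols:
--     :param s_cols:
--     :param prefix:
--     :return:
--     """
--     out = []
--     prefix_cond = len(prefix) == 0
--     for i, c in enumerate(cols):
--         for j, s in enumerate(s_cols):
--             # if the survey magnitude name is in and the prefix is in
--             # of if there is no prefix and the magnitude name is equal to the survey name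
--             if ((s in c and prefix in c and not prefix_cond) or
--                     (prefix_cond and (c == s or 'mag' in c or 'Petro' in c))):
--                 out.append(c)
--                 break
--
--     cols_new = []
--     for i, c in enumerate(cols):
--         if c not in out:
--             cols_new.append(c)
--     return cols_new, out
-- ===== SOURCE B (Python) =====
-- def get_survey_cols(cols, s_cols, prefix):
--     """Single-pass partition of cols into (non-matching, matching)."""
--     def matches(c):
--         return any(
--             (s in c and prefix in c and prefix != '') or
--             (prefix == '' and (c == s or 'mag' in c or 'Petro' in c))
--             for s in s_cols)
--     cols_new, out = [], []
--     for c in cols: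
--         (out if matches(c) else cols_new).append(c)
--     return cols_new, out
-- ===== Notes on version B (the rewrite author's own statement) =====
-- stated objective: simpler
-- what changed: Single pass that partitions each column directly by the match test, instead of building the matched list and then re-scanning all columns with a 'c not in out' membership check.
import Mathlib
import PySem

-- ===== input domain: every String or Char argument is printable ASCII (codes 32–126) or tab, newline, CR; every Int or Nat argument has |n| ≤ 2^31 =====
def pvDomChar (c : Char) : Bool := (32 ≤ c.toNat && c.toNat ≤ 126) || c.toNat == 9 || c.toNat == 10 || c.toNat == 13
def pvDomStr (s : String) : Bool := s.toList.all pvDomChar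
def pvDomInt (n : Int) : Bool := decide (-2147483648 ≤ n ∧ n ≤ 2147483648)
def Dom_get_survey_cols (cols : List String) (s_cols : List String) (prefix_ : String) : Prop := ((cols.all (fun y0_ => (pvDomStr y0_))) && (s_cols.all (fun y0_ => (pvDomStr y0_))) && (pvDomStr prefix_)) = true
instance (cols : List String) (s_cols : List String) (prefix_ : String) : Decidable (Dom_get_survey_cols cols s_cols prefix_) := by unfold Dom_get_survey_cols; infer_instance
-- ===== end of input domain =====

-- B replaces A's build-then-filter (second scan with a 'c not in out' test) by a single
-- pass that partitions each column directly by the match test; same return value.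
-- ===== PORT A =====
-- inner 'for s in s_cols: if cond: append; break' loop: returns whether c was appended
def pvInnerA (c : String) (prefix_ : String) (prefix_cond : Bool) : List String → Bool
  | [] => false
  | s :: rest =>
    if (PySem.Str.isIn s c && PySem.Str.isIn prefix_ c && !prefix_cond)
        || (prefix_cond && (c == s || PySem.Str.isIn "mag" c || PySem.Str.isIn "Petro" c)) then
      true
    else pvInnerA c prefix_ prefix_cond rest

def get_survey_cols (cols : List String) (s_cols : List String) (prefix_ : String) : List String × List String :=
  let prefix_cond : Bool := PySem.Str.len prefix_ == 0
  let out : List String :=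
    cols.foldl (fun out c => if pvInnerA c prefix_ prefix_cond s_cols then out ++ [c] else out) []
  let cols_new : List String :=
    cols.foldl (fun acc c => if out.contains c then acc else acc ++ [c]) []
  (cols_new, out)

-- ===== PORT B =====
def pvMatchesB (s_cols : List String) (prefix_ : String) (c : String) : Bool :=
  s_cols.any (fun s =>
    (PySem.Str.isIn s c && PySem.Str.isIn prefix_ c && !(prefix_ == ""))
    || ((prefix_ == "") && (c == s || PySem.Str.isIn "mag" c || PySem.Str.isIn "Petro" c)))

def get_survey_cols_alt (cols : List String) (s_cols : List String) (prefix_ : String) : List String × List String :=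
  let p := cols.foldl
    (fun (p : List String × List String) c =>
      if pvMatchesB s_cols prefix_ c then (p.1, p.2 ++ [c]) else (p.1 ++ [c], p.2))
    ([], [])
  (p.1, p.2)

-- ===== PRECONDITION & SPEC =====
def Spec_get_survey_cols (cols : List String) (s_cols : List String) (prefix_ : String) (out : List String × List String) : Prop := out = get_survey_cols_alt cols s_cols prefix_
instance (cols : List String) (s_cols : List String) (prefix_ : String) (out : List String × List String) : Decidable (Spec_get_survey_cols cols s_cols prefix_ out) := by unfold Spec_get_survey_cols; infer_instance

-- ===== CLAIM (what is proved, stated in full; the proofs are below) =====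
def Claim_equal_get_survey_cols : Prop := ∀ (cols : List String) (s_cols : List String) (prefix_ : String), Dom_get_survey_cols cols s_cols prefix_ → Spec_get_survey_cols cols s_cols prefix_ (get_survey_cols cols s_cols prefix_)

-- ===== LEMMAS AND PROOFS =====
theorem pvLenZero (prefix_ : String) : (PySem.Str.len prefix_ == 0) = (prefix_ == "") := by
  rw [Bool.eq_iff_iff]
  simp only [beq_iff_eq, PySem.Str.len_eq]
  rw [← String.toList_inj]
  cases prefix_.toList
  · simp
  · simp
    omega

theorem pvIfOr (C b : Bool) : (if C = true then true else b) = (C || b) := by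
  cases C <;> simp

theorem pvInnerA_eq_any (c prefix_ : String) (s_cols : List String) :
    pvInnerA c prefix_ (PySem.Str.len prefix_ == 0) s_cols = pvMatchesB s_cols prefix_ c := by
  induction s_cols with
  | nil => simp [pvInnerA, pvMatchesB]
  | cons s rest ih =>
    rw [pvLenZero] at ih ⊢
    rw [pvInnerA, ih]
    simp only [pvMatchesB, List.any_cons]
    exact pvIfOr _ _

theorem pvFoldB (s_cols : List String) (prefix_ : String) (cols a b : List String) :
    cols.foldl
      (fun (p : List String × List String) c =>
        if pvMatchesB s_cols prefix_ c then (p.1, p.2 ++ [c]) else (p.1 ++ [c], p.2))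
      (a, b)
    = (a ++ cols.filter (fun c => !pvMatchesB s_cols prefix_ c),
       b ++ cols.filter (fun c => pvMatchesB s_cols prefix_ c)) := by
  induction cols generalizing a b with
  | nil => simp
  | cons c cols ih =>
    simp only [List.foldl_cons, List.filter_cons]
    by_cases h : pvMatchesB s_cols prefix_ c <;> simp [h, ih]

-- ===== VERDICT (by name: the statement is the Claim_ definition above) =====
theorem get_survey_cols_spec : Claim_equal_get_survey_cols := by
  unfold Claim_equal_get_survey_cols
  intro cols s_cols prefix_ _
  show get_survey_cols cols s_cols prefix_ = get_survey_cols_alt cols s_cols prefix_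
  unfold get_survey_cols get_survey_cols_alt
  dsimp only
  rw [pvFoldB]
  have hout : cols.foldl
      (fun out c => if pvInnerA c prefix_ (PySem.Str.len prefix_ == 0) s_cols then out ++ [c] else out) []
      = cols.filter (fun c => pvMatchesB s_cols prefix_ c) := by
    simp only [pvInnerA_eq_any]
    simpa using PySem.List.foldl_append_if_eq_filter (p := fun c => pvMatchesB s_cols prefix_ c) (l := cols) (acc := [])
  rw [hout]
  have hmem : ∀ (acc : List String) (c : String), c ∈ cols →
      (fun acc c => if (cols.filter (fun c => pvMatchesB s_cols prefix_ c)).contains c then acc else acc ++ [c]) acc c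
        = (fun acc c => if pvMatchesB s_cols prefix_ c then acc else acc ++ [c]) acc c := by
    intro acc c hc
    by_cases h : pvMatchesB s_cols prefix_ c <;>
      simp [List.mem_filter, hc, h]
  rw [PySem.List.foldl_congr_mem cols
      (fun acc c => if (cols.filter (fun c => pvMatchesB s_cols prefix_ c)).contains c then acc else acc ++ [c])
      (fun acc c => if pvMatchesB s_cols prefix_ c then acc else acc ++ [c]) [] hmem]
  have hnew : cols.foldl (fun acc c => if pvMatchesB s_cols prefix_ c then acc else acc ++ [c]) []
      = cols.filter (fun c => !pvMatchesB s_cols prefix_ c) := by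
    have hsw : ∀ (acc : List String), ∀ c ∈ cols,
        (fun acc c => if pvMatchesB s_cols prefix_ c then acc else acc ++ [c]) acc c
        = (fun acc c => if (!pvMatchesB s_cols prefix_ c) then acc ++ [c] else acc) acc c := by
      intro acc c _
      cases h : pvMatchesB s_cols prefix_ c <;> simp [h]
    rw [PySem.List.foldl_congr_mem cols _ _ [] hsw]
    simpa using PySem.List.foldl_append_if_eq_filter (p := fun c => !pvMatchesB s_cols prefix_ c) (l := cols) (acc := ([] : List String))
  rw [hnew]
  simp
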